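-- pv_equiv track=rewrite | github.com/ursakumeljfaks/Prakticna-matematika | 1.letnik/programiranje1/vaje/15/slovarji/zbiranje_osebnih_podatkov.py | ujemanje
-- ===== SOURCE A (Python) =====
-- def ujemanje(oseba1, oseba2):
--     """pove v koliko lastnostih se oseba1 in oseba2 ujemata in v koliko razlikujeta"""
--     ujemata = 0
--     razlikujeta = 0
--     for lastnost1 in oseba1:
--         for lastnost2 in oseba2:
--             if lastnost1 == lastnost2:
--                 if oseba1.get(lastnost1, None) == oseba2.get(lastnost2, None):
--                     ujemata += 1
--                 else:
--                     razlikujeta += 1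
--     return (ujemata, razlikujeta)
-- ===== SOURCE B (Python) =====
-- def ujemanje(oseba1, oseba2):
--     """pove v koliko lastnostih se oseba1 in oseba2 ujemata in v koliko razlikujeta"""
--     common = oseba1.keys() & oseba2.keys()
--     ujemata = sum(1 for k in common if oseba1[k] == oseba2[k])
--     return (ujemata, len(common) - ujemata)
-- ===== Notes on version B (the rewrite author's own statement) =====
-- stated objective: simpler
-- what changed: Replaces the nested scan over both key lists and its two-branch counter with a set intersection of the key views, one pass counting matches over the common keys, and the differing count derived by subtraction.
import Mathlib
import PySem

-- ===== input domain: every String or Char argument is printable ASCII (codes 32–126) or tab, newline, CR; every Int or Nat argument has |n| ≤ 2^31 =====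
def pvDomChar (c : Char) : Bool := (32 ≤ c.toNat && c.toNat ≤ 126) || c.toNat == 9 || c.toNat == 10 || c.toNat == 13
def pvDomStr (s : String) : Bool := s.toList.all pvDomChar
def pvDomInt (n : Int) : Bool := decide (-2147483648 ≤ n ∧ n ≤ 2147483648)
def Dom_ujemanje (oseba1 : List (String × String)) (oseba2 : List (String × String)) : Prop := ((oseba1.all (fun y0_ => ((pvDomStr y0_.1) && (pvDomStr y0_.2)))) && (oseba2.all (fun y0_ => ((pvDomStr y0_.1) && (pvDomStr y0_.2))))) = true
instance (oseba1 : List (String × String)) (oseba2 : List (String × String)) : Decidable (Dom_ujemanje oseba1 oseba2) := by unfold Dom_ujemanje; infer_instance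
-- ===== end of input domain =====

-- ===== PORT A =====
-- B replaces A's nested double scan with a key-set intersection, one counting pass and a
-- subtraction (objective: simpler). Python's tuple result is ported as a 2-element List Int.
-- shared lookup helper: Python dict.get / d[k] on the association-list representation (first match)
def pvGet (o : List (String × String)) (k : String) : Option String :=
  (o.find? (fun p => p.1 == k)).map Prod.snd

def ujemanje (oseba1 : List (String × String)) (oseba2 : List (String × String)) : List Int :=
  let res : Int × Int :=
    (oseba1.map Prod.fst).foldl (fun (acc : Int × Int) l1 =>
      (oseba2.map Prod.fst).foldl (fun (acc2 : Int × Int) l2 =>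
        if l1 == l2 then
          if pvGet oseba1 l1 == pvGet oseba2 l2 then (acc2.1 + 1, acc2.2)
          else (acc2.1, acc2.2 + 1)
        else acc2) acc) (0, 0)
  [res.1, res.2]

-- ===== PORT B =====
def ujemanje_alt (oseba1 : List (String × String)) (oseba2 : List (String × String)) : List Int :=
  let common : PySem.Set String :=
    PySem.Set.inter (PySem.Set.ofList (oseba1.map Prod.fst)) (oseba2.map Prod.fst)
  let ujemata : Int :=
    common.foldl (fun acc k => if pvGet oseba1 k == pvGet oseba2 k then acc + 1 else acc) 0
  [ujemata, (common.length : Int) - ujemata]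

-- ===== PRECONDITION & SPEC =====
-- Pre_ requires distinct keys in each association list: the Python arguments are dicts, whose
-- keys are necessarily distinct, so this excludes no input the Python A ever receives.
def Pre_ujemanje (oseba1 : List (String × String)) (oseba2 : List (String × String)) : Prop :=
  (oseba1.map Prod.fst).Nodup ∧ (oseba2.map Prod.fst).Nodup
instance (oseba1 : List (String × String)) (oseba2 : List (String × String)) : Decidable (Pre_ujemanje oseba1 oseba2) := by unfold Pre_ujemanje; infer_instance
def pvWitness_ujemanje : (List (String × String)) × (List (String × String)) :=
  ([("ime", "Ana"), ("starost", "7")], [("ime", "Bor"), ("starost", "7")])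

def Spec_ujemanje (oseba1 : List (String × String)) (oseba2 : List (String × String)) (out : List Int) : Prop := out = ujemanje_alt oseba1 oseba2
instance (oseba1 : List (String × String)) (oseba2 : List (String × String)) (out : List Int) : Decidable (Spec_ujemanje oseba1 oseba2 out) := by unfold Spec_ujemanje; infer_instance

-- ===== CLAIM (what is proved, stated in full; the proofs are below) =====
def Claim_equal_ujemanje : Prop := ∀ (oseba1 : List (String × String)) (oseba2 : List (String × String)), Dom_ujemanje oseba1 oseba2 → Pre_ujemanje oseba1 oseba2 → Spec_ujemanje oseba1 oseba2 (ujemanje oseba1 oseba2)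

-- ===== LEMMAS AND PROOFS =====
theorem pv_wit : Dom_ujemanje pvWitness_ujemanje.1 pvWitness_ujemanje.2 ∧ Pre_ujemanje pvWitness_ujemanje.1 pvWitness_ujemanje.2 := by decide

-- the inner loop does nothing when l1 does not occur in ks
theorem inner_not_mem (o1 o2 : List (String × String)) (l1 : String) (ks : List String)
    (h : l1 ∉ ks) (acc : Int × Int) :
    ks.foldl (fun (acc2 : Int × Int) l2 =>
      if l1 == l2 then
        if pvGet o1 l1 == pvGet o2 l2 then (acc2.1 + 1, acc2.2) else (acc2.1, acc2.2 + 1)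
      else acc2) acc = acc := by
  induction ks generalizing acc with
  | nil => rfl
  | cons a ks ih =>
    simp only [List.mem_cons, not_or] at h
    have hne : (l1 == a) = false := beq_eq_false_iff_ne.mpr h.1
    simp only [List.foldl_cons, hne, Bool.false_eq_true, if_false]
    exact ih h.2 acc

-- over a duplicate-free key list the inner loop fires its branch exactly once when l1 occurs
theorem inner_mem (o1 o2 : List (String × String)) (l1 : String) (ks : List String)
    (hnd : ks.Nodup) (h : l1 ∈ ks) (acc : Int × Int) :
    ks.foldl (fun (acc2 : Int × Int) l2 =>
      if l1 == l2 then
        if pvGet o1 l1 == pvGet o2 l2 then (acc2.1 + 1, acc2.2) else (acc2.1, acc2.2 + 1)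
      else acc2) acc =
    (if pvGet o1 l1 == pvGet o2 l1 then (acc.1 + 1, acc.2) else (acc.1, acc.2 + 1)) := by
  induction ks generalizing acc with
  | nil => cases h
  | cons a ks ih =>
    rcases List.nodup_cons.mp hnd with ⟨ha, hnd'⟩
    rcases List.mem_cons.mp h with rfl | hm
    · have ht : (l1 == l1) = true := beq_self_eq_true l1
      simp only [List.foldl_cons, ht, if_true]
      exact inner_not_mem o1 o2 l1 ks ha _
    · have hne : (l1 == a) = false := beq_eq_false_iff_ne.mpr (fun he => ha (he ▸ hm))
      simp only [List.foldl_cons, hne, Bool.false_eq_true, if_false]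
      exact ih hnd' hm acc

-- outer loop characterisation: two independent counters over the keys of o1
theorem outer_eq (o1 o2 : List (String × String)) (ks : List String)
    (hnd2 : (o2.map Prod.fst).Nodup) (acc : Int × Int) :
    ks.foldl (fun (acc : Int × Int) l1 =>
      (o2.map Prod.fst).foldl (fun (acc2 : Int × Int) l2 =>
        if l1 == l2 then
          if pvGet o1 l1 == pvGet o2 l2 then (acc2.1 + 1, acc2.2) else (acc2.1, acc2.2 + 1)
        else acc2) acc) acc =
    (acc.1 + (ks.countP (fun l => (o2.map Prod.fst).contains l && (pvGet o1 l == pvGet o2 l)) : Int),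
     acc.2 + (ks.countP (fun l => (o2.map Prod.fst).contains l && !(pvGet o1 l == pvGet o2 l)) : Int)) := by
  induction ks generalizing acc with
  | nil => simp
  | cons a ks ih =>
    simp only [List.foldl_cons]
    by_cases hm : a ∈ o2.map Prod.fst
    · have hc : (o2.map Prod.fst).contains a = true := List.elem_eq_true_of_mem hm
      rw [inner_mem o1 o2 a _ hnd2 hm acc, ih]
      by_cases hv : (pvGet o1 a == pvGet o2 a) = true
      · simp only [hv, if_true, List.countP_cons, hc, Bool.and_true, Bool.not_true,
          Bool.and_false, if_true, Prod.mk.injEq]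
        constructor <;> push_cast <;> ring
      · have hv' : (pvGet o1 a == pvGet o2 a) = false := Bool.eq_false_iff.mpr hv
        simp only [hv', Bool.false_eq_true, if_false, List.countP_cons, hc, Bool.and_false,
          Bool.not_false, Bool.and_true, Prod.mk.injEq]
        constructor <;> push_cast <;> ring
    · have hc : (o2.map Prod.fst).contains a = false := by
        simpa using hm
      rw [inner_not_mem o1 o2 a _ hm acc, ih]
      simp only [List.countP_cons, hc, Bool.false_and, Bool.false_eq_true, if_false, Nat.add_zero]

-- a Bool predicate partitions a list: countP q = countP (q ∧ r) + countP (q ∧ ¬r)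
theorem countP_split (l : List String) (q r : String → Bool) :
    l.countP q = l.countP (fun x => q x && r x) + l.countP (fun x => q x && !r x) := by
  induction l with
  | nil => rfl
  | cons a l ih =>
    simp only [List.countP_cons]
    cases hq : q a <;> cases hr : r a <;> simp [ih] <;> omega

-- ===== VERDICT (by name: the statement is the Claim_ definition above) =====
theorem ujemanje_spec : Claim_equal_ujemanje := by
  intro o1 o2 _ hpre
  unfold Spec_ujemanje ujemanje ujemanje_alt
  rw [outer_eq o1 o2 _ hpre.2]
  rw [PySem.Set.ofList_eq_self_of_nodup _ hpre.1]
  simp only [PySem.Set.inter, PySem.Set.contains]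
  rw [PySem.List.foldl_if_add_one]
  simp only [List.countP_filter, ← List.countP_eq_length_filter, zero_add, List.cons.injEq, and_true]
  have hsplit := countP_split (o1.map Prod.fst)
      (fun l => (o2.map Prod.fst).contains l) (fun l => pvGet o1 l == pvGet o2 l)
  have hc1 : (o1.map Prod.fst).countP
      (fun l => (o2.map Prod.fst).contains l && (pvGet o1 l == pvGet o2 l))
      = (o1.map Prod.fst).countP
      (fun a => (pvGet o1 a == pvGet o2 a) && (o2.map Prod.fst).contains a) :=
    List.countP_congr (by intro x _; simp [Bool.and_comm])
  constructor
  · omega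
  · omega
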